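-- pv_equiv track=rewrite | github.com/GiteZz/poif | poif/poif/input/transform/tools.py | catch_all_to_value
-- ===== SOURCE A (Python) =====
-- def catch_all_to_value(template: str):
--     """
--     */*.jpg -> {{1}}/{{2}}.jpg
--     """
--     new_template = ""
--     parts = template.split('*')
--     if len(parts) == 1:
--         return template
--
--     for index, part in enumerate(parts[:-1]):
--         new_template += part + "{{" + str(index) + "}}"
--     new_template += parts[-1]
--
--     return new_template
-- ===== SOURCE B (Python) =====
-- def catch_all_to_value(template: str):
--     """
--     */*.jpg -> {{0}}/{{1}}.jpg  (single left-to-right scan, no split/rebuild)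
--     """
--     out = []
--     counter = 0
--     for ch in template:
--         if ch == '*':
--             out.append("{{" + str(counter) + "}}")
--             counter += 1
--         else:
--             out.append(ch)
--     return "".join(out)
-- ===== Notes on version B (the rewrite author's own statement) =====
-- stated objective: simpler
-- what changed: Replaced split('*')/enumerate/rebuild (with a special no-wildcard early return) by a single character scan that appends each char verbatim and emits '{{counter}}' at each '*', needing no special cases.
import Mathlib
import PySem

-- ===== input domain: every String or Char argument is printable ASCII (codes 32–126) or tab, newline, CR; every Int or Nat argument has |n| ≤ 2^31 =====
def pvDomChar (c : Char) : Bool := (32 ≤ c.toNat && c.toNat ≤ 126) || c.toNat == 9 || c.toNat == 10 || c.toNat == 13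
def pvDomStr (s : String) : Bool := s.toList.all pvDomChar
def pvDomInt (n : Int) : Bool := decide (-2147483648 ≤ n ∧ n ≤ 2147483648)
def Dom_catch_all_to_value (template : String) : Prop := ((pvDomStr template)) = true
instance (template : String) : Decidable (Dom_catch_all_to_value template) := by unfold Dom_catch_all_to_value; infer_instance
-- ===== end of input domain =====

-- B replaces A's split('*')/enumerate/rebuild (with its no-wildcard early return) by one
-- character scan with a counter; objective: simpler.

-- ===== PORT A =====
-- A: parts = template.split('*'); early return if one part; else rebuild with "{{index}}".
def catch_all_to_value (template : String) : String :=
  let parts : List (List Char) := PySem.Chars.splitOn template.toList ['*']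
  if parts.length = 1 then template
  else
    let new_template : List Char :=
      (PySem.List.enumerate (PySem.List.slice parts none (some (-1)))).foldl
        (fun acc p => acc ++ p.2 ++ ['{', '{'] ++ PySem.Int.toChars p.1 ++ ['}', '}']) []
    String.ofList (new_template ++ PySem.List.pyGetD parts (-1) [])

-- ===== PORT B =====
-- B: single scan; state = (counter, output so far); '*' emits "{{counter}}" and bumps it.
def catch_all_to_value_alt (template : String) : String :=
  String.ofList
    (template.toList.foldl
      (fun (st : Int × List Char) c =>
        if c = '*' then (st.1 + 1, st.2 ++ ['{', '{'] ++ PySem.Int.toChars st.1 ++ ['}', '}'])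
        else (st.1, st.2 ++ [c]))
      (0, [])).2

-- ===== PRECONDITION & SPEC =====
def Spec_catch_all_to_value (template : String) (out : String) : Prop := out = catch_all_to_value_alt template
instance (template : String) (out : String) : Decidable (Spec_catch_all_to_value template out) := by unfold Spec_catch_all_to_value; infer_instance

-- ===== CLAIM (what is proved, stated in full; the proofs are below) =====
def Claim_equal_catch_all_to_value : Prop := ∀ (template : String), Dom_catch_all_to_value template → Spec_catch_all_to_value template (catch_all_to_value template)

-- ===== LEMMAS AND PROOFS =====

-- "{{n}}" as a char list
def pvBr (n : Int) : List Char := ['{', '{'] ++ PySem.Int.toChars n ++ ['}', '}']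

-- prepend c to the head part
def pvConsHead (c : Char) : List (List Char) → List (List Char)
  | [] => [[c]]
  | h :: t => (c :: h) :: t

-- simple structural recursion computing split on '*'
def pvSplitStar : List Char → List (List Char)
  | [] => [[]]
  | c :: cs => if c = '*' then [] :: pvSplitStar cs else pvConsHead c (pvSplitStar cs)

theorem pvSplitStar_ne_nil (cs : List Char) : pvSplitStar cs ≠ [] := by
  induction cs with
  | nil => simp [pvSplitStar]
  | cons c cs ih =>
    simp only [pvSplitStar]
    split_ifs
    · simp
    · cases h : pvSplitStar cs with
      | nil => exact absurd h ih
      | cons a t => simp [pvConsHead]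

theorem pvGo_spec (fuel : Nat) (l cur : List Char) (acc : List (List Char))
    (h : l.length < fuel) :
    PySem.Chars.splitOn.go ['*'] fuel l cur acc =
      acc.reverse ++ (match pvSplitStar l with
        | [] => [cur.reverse]
        | h :: t => (cur.reverse ++ h) :: t) := by
  induction fuel generalizing l cur acc with
  | zero => omega
  | succ fuel ih =>
    cases l with
    | nil => simp [PySem.Chars.splitOn.go, pvSplitStar]
    | cons c rest =>
      by_cases hc : c = '*'
      · subst hc
        have hpref : List.isPrefixOf ['*'] ('*' :: rest) = true := by
          simp [List.isPrefixOf]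
        simp only [PySem.Chars.splitOn.go, hpref, if_pos, List.length_cons,
          List.drop_succ_cons, List.length_nil, List.drop_zero]
        rw [ih rest [] (cur.reverse :: acc) (by simpa using Nat.lt_of_succ_lt_succ h)]
        cases hs : pvSplitStar rest with
        | nil => exact absurd hs (pvSplitStar_ne_nil rest)
        | cons a t => simp [pvSplitStar, hs]
      · have hpref : List.isPrefixOf ['*'] (c :: rest) = false := by
          simp [List.isPrefixOf]; exact fun e => hc e.symm
        simp only [PySem.Chars.splitOn.go, hpref, Bool.false_eq_true, if_false]
        rw [ih rest (c :: cur) acc (by simpa using Nat.lt_of_succ_lt_succ h)]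
        cases hs : pvSplitStar rest with
        | nil => exact absurd hs (pvSplitStar_ne_nil rest)
        | cons a t => simp [pvSplitStar, hc, hs, pvConsHead]

theorem pvSplitOn_eq (cs : List Char) :
    PySem.Chars.splitOn cs ['*'] = pvSplitStar cs := by
  unfold PySem.Chars.splitOn
  rw [pvGo_spec (cs.length + 1) cs [] [] (by omega)]
  cases hs : pvSplitStar cs with
  | nil => exact absurd hs (pvSplitStar_ne_nil cs)
  | cons a t => simp

-- interleave parts with numbered braces, last part plain
def pvRebuild (n : Int) : List (List Char) → List Char
  | [] => []
  | [p] => p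
  | p :: q :: rest => p ++ pvBr n ++ pvRebuild (n + 1) (q :: rest)

-- A's loop output over an initial-parts list
def pvFlat (n : Int) : List (List Char) → List Char
  | [] => []
  | p :: ps => p ++ pvBr n ++ pvFlat (n + 1) ps

theorem pvRebuild_append (ps : List (List Char)) (p : List Char) (n : Int) :
    pvRebuild n (ps ++ [p]) = pvFlat n ps ++ p := by
  induction ps generalizing n with
  | nil => simp [pvRebuild, pvFlat]
  | cons q ps ih =>
    cases ps with
    | nil => simp [pvRebuild, pvFlat, ih]
    | cons r ps' =>
      have h2 := ih (n + 1)
      simp only [List.cons_append] at h2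
      simp [pvRebuild, pvFlat, h2]

theorem pvFoldA (ps : List (List Char)) (n : Int) (acc : List Char) :
    (PySem.List.enumerate ps n).foldl
        (fun acc p => acc ++ p.2 ++ ['{', '{'] ++ PySem.Int.toChars p.1 ++ ['}', '}']) acc =
      acc ++ pvFlat n ps := by
  induction ps generalizing n acc with
  | nil => simp [PySem.List.enumerate_nil, pvFlat]
  | cons p ps ih =>
    rw [PySem.List.enumerate_cons]
    simp only [List.foldl_cons, ih, pvFlat, pvBr]
    simp

theorem pvFoldB (cs : List Char) (n : Int) (acc : List Char) :
    (cs.foldl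
        (fun (st : Int × List Char) c =>
          if c = '*' then (st.1 + 1, st.2 ++ ['{', '{'] ++ PySem.Int.toChars st.1 ++ ['}', '}'])
          else (st.1, st.2 ++ [c]))
        (n, acc)).2 = acc ++ pvRebuild n (pvSplitStar cs) := by
  induction cs generalizing n acc with
  | nil => simp [pvSplitStar, pvRebuild]
  | cons c cs ih =>
    by_cases hc : c = '*'
    · subst hc
      simp only [List.foldl_cons, if_pos rfl, ih]
      cases hs : pvSplitStar cs with
      | nil => exact absurd hs (pvSplitStar_ne_nil cs)
      | cons a t => simp [pvSplitStar, hs, pvRebuild, pvBr]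
    · simp only [List.foldl_cons, if_neg hc, ih]
      cases hs : pvSplitStar cs with
      | nil => exact absurd hs (pvSplitStar_ne_nil cs)
      | cons a t =>
        cases t with
        | nil => simp [pvSplitStar, hc, hs, pvConsHead, pvRebuild]
        | cons b t' => simp [pvSplitStar, hc, hs, pvConsHead, pvRebuild]

theorem pvSplitStar_len_one (cs cs' : List Char) (h : pvSplitStar cs = [cs']) : cs' = cs := by
  induction cs generalizing cs' with
  | nil => simpa [pvSplitStar] using h.symm
  | cons c cs ih =>
    by_cases hc : c = '*'
    · subst hc
      simp only [pvSplitStar, if_pos rfl] at h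
      cases hs : pvSplitStar cs with
      | nil => exact absurd hs (pvSplitStar_ne_nil cs)
      | cons a t => rw [hs] at h; simp at h
    · simp only [pvSplitStar, if_neg hc] at h
      cases hs : pvSplitStar cs with
      | nil => exact absurd hs (pvSplitStar_ne_nil cs)
      | cons a t =>
        rw [hs] at h
        simp only [pvConsHead] at h
        injection h with h1 h2
        subst h2
        rw [← h1, ih a (by rw [hs])]

-- ===== VERDICT (by name: the statement is the Claim_ definition above) =====
theorem catch_all_to_value_spec : Claim_equal_catch_all_to_value := by
  intro template _
  unfold Spec_catch_all_to_value catch_all_to_value catch_all_to_value_alt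
  rw [pvFoldB template.toList 0 []]
  simp only [pvSplitOn_eq]
  set parts := pvSplitStar template.toList with hp
  by_cases h1 : parts.length = 1
  · rw [if_pos h1]
    cases hs : parts with
    | nil => exact absurd hs (pvSplitStar_ne_nil template.toList)
    | cons a t =>
      rw [hs] at h1
      cases t with
      | cons b t' => simp at h1
      | nil =>
        have := pvSplitStar_len_one template.toList a (by rw [← hp, hs])
        subst this
        simp [hs, pvRebuild]
  · rw [if_neg h1]
    have hne : parts ≠ [] := pvSplitStar_ne_nil template.toList
    rw [pvFoldA]
    have hslice : PySem.List.slice parts none (some (-1)) = parts.dropLast := by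
      rw [List.dropLast_eq_take]
      simp [PySem.List.slice]
    have hr : pvRebuild 0 parts = pvFlat 0 parts.dropLast ++ parts.getLast hne := by
      conv_lhs => rw [← List.dropLast_concat_getLast hne]
      rw [pvRebuild_append]
    rw [hslice, PySem.List.pyGetD_neg_one parts [] hne, hr]
    simp
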